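-- pv_equiv track=rewrite | github.com/Lu1zReis/exercicios-Python | testes e exercícios/sistemas/tat.py | getTautogram
-- ===== SOURCE A (Python) =====
-- def getTautogram(v):
--     tam = len(v)
--     letra = ''
--     erros = 0
--     for i in range(0, tam):
--         if i == 0:
--             letra = v[i][0]
--         else:
--             if letra.lower() != v[i][0].lower():
--                 erros += 1
--     if erros > 0:
--         return 'N'
--     else:
--         return 'Y'
-- ===== SOURCE B (Python) =====
-- def getTautogram(v):
--     return 'Y' if len({w[0].lower() for w in v}) <= 1 else 'N'
-- ===== Notes on version B (the rewrite author's own statement) =====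
-- stated objective: simpler
-- what changed: Replaces the reference-letter-plus-error-counter loop with a one-liner that collects the distinct lowercased first letters into a set and returns 'Y' iff it has at most one element.
import Mathlib
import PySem

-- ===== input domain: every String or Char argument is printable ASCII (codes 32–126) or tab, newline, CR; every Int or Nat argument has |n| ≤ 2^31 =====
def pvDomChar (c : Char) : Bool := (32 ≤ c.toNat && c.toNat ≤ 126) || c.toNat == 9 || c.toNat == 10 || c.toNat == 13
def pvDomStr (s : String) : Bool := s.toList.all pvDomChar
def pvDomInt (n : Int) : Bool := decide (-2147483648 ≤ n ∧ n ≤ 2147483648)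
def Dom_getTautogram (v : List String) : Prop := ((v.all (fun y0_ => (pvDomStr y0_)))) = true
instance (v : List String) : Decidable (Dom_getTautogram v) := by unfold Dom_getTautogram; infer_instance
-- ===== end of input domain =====

-- B: collect the distinct lowercased first letters into a set and test its cardinality, instead of
-- A's reference-letter-plus-error-counter loop (objective: simpler).

-- ===== PORT A =====
-- letra starts as ''; it is always overwritten at i = 0 before being compared, so it is modelled as a
-- Char with placeholder '?'. w[0] is ported with the total form (pyGet? …).getD '?' — exact under
-- Pre_ (no empty strings; on an empty string Python raises IndexError).
def getTautogram (v : List String) : String :=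
  let tam : Int := (v.length : Int)
  let st := (PySem.List.pyRange 0 tam 1).foldl
    (fun (st : Char × Int) i =>
      if i = 0 then
        ((PySem.Str.pyGet? (PySem.List.pyGetD v i "") 0).getD '?', st.2)
      else
        if PySem.Chars.lowerChar st.1 ≠
            PySem.Chars.lowerChar ((PySem.Str.pyGet? (PySem.List.pyGetD v i "") 0).getD '?') then
          (st.1, st.2 + 1)
        else st)
    ('?', 0)
  if st.2 > 0 then "N" else "Y"

-- ===== PORT B =====
-- {w[0].lower() for w in v}: Python's one-character strings are modelled as Char (exact);
-- w[0] again as the total form (pyGet? …).getD '?' under Pre_.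
def getTautogram_alt (v : List String) : String :=
  let letters : PySem.Set Char :=
    PySem.Set.ofList (v.map (fun w => PySem.Chars.lowerChar ((PySem.Str.pyGet? w 0).getD '?')))
  if letters.length ≤ 1 then "Y" else "N"

-- ===== PRECONDITION & SPEC =====
-- Pre_ excludes lists containing the empty string, on which both A and B raise IndexError (w[0]).
def Pre_getTautogram (v : List String) : Prop := ∀ w ∈ v, w ≠ ""
instance (v : List String) : Decidable (Pre_getTautogram v) := by
  unfold Pre_getTautogram; infer_instance
def pvWitness_getTautogram : List String := ["Ab", "ax"]
def Spec_getTautogram (v : List String) (out : String) : Prop := out = getTautogram_alt v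
instance (v : List String) (out : String) : Decidable (Spec_getTautogram v out) := by
  unfold Spec_getTautogram; infer_instance

-- ===== CLAIM (what is proved, stated in full; the proofs are below) =====
def Claim_equal_getTautogram : Prop :=
  ∀ (v : List String), Dom_getTautogram v → Pre_getTautogram v →
    Spec_getTautogram v (getTautogram v)

-- ===== LEMMAS AND PROOFS =====

-- lowercased first letter of a word (total form)
def pvG (w : String) : Char := PySem.Chars.lowerChar ((PySem.Str.pyGet? w 0).getD '?')

-- A's inner loop (after the i = 0 step) keeps letra fixed and counts mismatches.
theorem pvFoldA (ws : List String) (c : Char) (e : Int) :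
    ws.foldl
      (fun (st : Char × Int) u =>
        if PySem.Chars.lowerChar st.1 ≠
            PySem.Chars.lowerChar ((PySem.Str.pyGet? u 0).getD '?') then
          (st.1, st.2 + 1)
        else st)
      (c, e)
    = (c, e + ((ws.filter (fun u => pvG u ≠ PySem.Chars.lowerChar c)).length : Int)) := by
  induction ws generalizing e with
  | nil => simp
  | cons u ws ih =>
    by_cases h : pvG u = PySem.Chars.lowerChar c
    · have h1 : ¬ (PySem.Chars.lowerChar c ≠
          PySem.Chars.lowerChar ((PySem.Str.pyGet? u 0).getD '?')) := by
        unfold pvG at h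
        exact fun hne => hne h.symm
      rw [List.foldl_cons, if_neg h1, ih, List.filter_cons_of_neg (by simp [h])]
    · have h1 : PySem.Chars.lowerChar c ≠
          PySem.Chars.lowerChar ((PySem.Str.pyGet? u 0).getD '?') := by
        unfold pvG at h
        exact fun he => h he.symm
      rw [List.foldl_cons, if_pos h1, ih, List.filter_cons_of_pos (by simp [h])]
      simp only [List.length_cons, Prod.mk.injEq, true_and]
      push_cast
      ring

theorem pvAddLen {α : Type} [BEq α] (s : List α) (x : α) :
    s.length ≤ (PySem.Set.add s x).length := by
  simp only [PySem.Set.add]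
  split <;> simp

theorem pvFoldAddLen {α : Type} [BEq α] (l : List α) (s : List α) :
    s.length ≤ (l.foldl PySem.Set.add s).length := by
  induction l generalizing s with
  | nil => simp
  | cons x l ih => exact le_trans (pvAddLen s x) (ih _)

theorem pvFoldAddSelf {α : Type} [BEq α] [LawfulBEq α] (l : List α) (a : α)
    (h : ∀ x ∈ l, x = a) : l.foldl PySem.Set.add [a] = [a] := by
  induction l with
  | nil => rfl
  | cons x l ih =>
    have hx : x = a := h x (List.mem_cons_self ..)
    subst hx
    have : PySem.Set.add [x] x = [x] := by
      simp [PySem.Set.add, PySem.Set.contains]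
    simp only [List.foldl_cons, this]
    exact ih (fun y hy => h y (List.mem_cons_of_mem _ hy))

-- the set of first letters of a nonempty list has at most one element iff all letters equal the first
theorem pvSetLen {α : Type} [BEq α] [LawfulBEq α] (a : α) (l : List α) :
    (PySem.Set.ofList (a :: l)).length ≤ 1 ↔ ∀ x ∈ l, x = a := by
  have hof : PySem.Set.ofList (a :: l) = l.foldl PySem.Set.add [a] := by
    rw [PySem.Set.ofList_eq_foldl]
    simp [List.foldl_cons, PySem.Set.add, PySem.Set.contains]
  rw [hof]
  constructor
  · intro hlen x hx
    by_contra hne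
    -- find the first element of l not equal to a; the set then has ≥ 2 elements
    clear hof
    induction l generalizing x with
    | nil => exact absurd hx (List.not_mem_nil)
    | cons y l ih =>
      by_cases hy : y = a
      · subst hy
        have : PySem.Set.add [y] y = [y] := by
          simp [PySem.Set.add, PySem.Set.contains]
        simp only [List.foldl_cons, this] at hlen
        rcases List.mem_cons.mp hx with rfl | hx'
        · exact hne rfl
        · exact ih hlen x hx' hne
      · have hadd : PySem.Set.add [a] y = [a, y] := by
          simp [PySem.Set.add, PySem.Set.contains]
          exact fun h => hy h
        simp only [List.foldl_cons, hadd] at hlen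
        have := pvFoldAddLen l [a, y]
        simp at this
        omega
  · intro h
    rw [pvFoldAddSelf l a h]
    simp

theorem getTautogram_eq (v : List String) : getTautogram v = getTautogram_alt v := by
  cases v with
  | nil => rfl
  | cons w ws =>
    unfold getTautogram getTautogram_alt
    dsimp only
    -- unroll the first loop iteration (i = 0)
    have hrange : PySem.List.pyRange 0 ((w :: ws).length : Int) 1 =
        0 :: PySem.List.pyRange 1 ((w :: ws).length : Int) 1 := by
      apply PySem.List.pyRange_one_cons
      simp
    rw [hrange]
    rw [List.foldl_cons]
    simp only [reduceIte]
    have hc := PySem.List.foldl_congr_mem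
      (PySem.List.pyRange 1 ((w :: ws).length : Int))
      (fun (st : Char × Int) i =>
        if i = 0 then ((PySem.Str.pyGet? (PySem.List.pyGetD (w :: ws) i "") 0).getD '?', st.2)
        else
          if PySem.Chars.lowerChar st.1 ≠
              PySem.Chars.lowerChar ((PySem.Str.pyGet? (PySem.List.pyGetD (w :: ws) i "") 0).getD '?') then
            (st.1, st.2 + 1)
          else st)
      (fun (st : Char × Int) i =>
        if PySem.Chars.lowerChar st.1 ≠
            PySem.Chars.lowerChar ((PySem.Str.pyGet? (PySem.List.pyGetD (w :: ws) i "") 0).getD '?') then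
          (st.1, st.2 + 1)
        else st)
      ((PySem.Str.pyGet? (PySem.List.pyGetD (w :: ws) 0 "") 0).getD '?', (0 : Int))
      (by
        intro acc x hx
        have h1 : (1 : Int) ≤ x := (PySem.List.mem_pyRange_one.mp hx).1
        have hne : ¬ (x = 0) := by omega
        simp only [hne, if_false])
    rw [hc]
    rw [PySem.List.foldl_pyRange_pyGetD' (w :: ws) ""
      (fun (st : Char × Int) u =>
        if PySem.Chars.lowerChar st.1 ≠
            PySem.Chars.lowerChar ((PySem.Str.pyGet? u 0).getD '?') then
          (st.1, st.2 + 1)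
        else st)
      ((PySem.Str.pyGet? (PySem.List.pyGetD (w :: ws) 0 "") 0).getD '?', (0 : Int))
      (a := 1) (by omega)]
    have h0 : PySem.List.pyGetD (w :: ws) 0 "" = w := by
      simp [PySem.List.pyGetD_zero_cons]
    simp only [Int.toNat_one, List.drop_succ_cons, List.drop_zero, h0, pvFoldA]
    simp only [List.map_cons]
    -- identify the mapped letter function with pvG
    have hmap : (fun w => PySem.Chars.lowerChar ((PySem.Str.pyGet? w 0).getD '?')) = pvG := rfl
    simp only [hmap]
    have hiff : ((ws.filter (fun u => pvG u ≠
          PySem.Chars.lowerChar ((PySem.Str.pyGet? w 0).getD '?'))).length = 0)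
        ↔ (PySem.Set.ofList (PySem.Chars.lowerChar ((PySem.Str.pyGet? w 0).getD '?') :: ws.map pvG)).length ≤ 1 := by
      rw [pvSetLen]
      rw [List.length_eq_zero_iff, List.filter_eq_nil_iff]
      constructor
      · intro h x hx
        rcases List.mem_map.mp hx with ⟨u, hu, rfl⟩
        have := h u hu
        simpa [pvG] using this
      · intro h u hu
        have := h (pvG u) (List.mem_map.mpr ⟨u, hu, rfl⟩)
        simp [pvG] at this ⊢
        exact this
    by_cases hz : (ws.filter (fun u => pvG u ≠
        PySem.Chars.lowerChar ((PySem.Str.pyGet? w 0).getD '?'))).length = 0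
    · rw [if_neg (by rw [hz]; simp), if_pos (hiff.mp hz)]
    · rw [if_pos (by omega), if_neg (fun h => hz (hiff.mpr h))]

-- ===== VERDICT (by name: the statement is the Claim_ definition above) =====
theorem getTautogram_spec : Claim_equal_getTautogram := by
  intro v _ _
  unfold Spec_getTautogram
  exact getTautogram_eq v
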